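-- pv_equiv track=rewrite | github.com/graham218/Leet-code.2025---Bill.Graham.Peacemaker- | Python/3-SlidingWindow/Algorithms/2-DynamicSlidingWindow/DynamicSlidingWindowPro.py | spam_detection
-- ===== SOURCE A (Python) =====
-- def spam_detection(email_scores, spam_threshold):
--     """
--     Detects spam emails using a dynamic sliding window.  It finds the largest window where the number of emails
--     with a spam score above a threshold exceeds the threshold itself.
--
--     Args:
--         email_scores (list): A list of spam scores for each email.
--         spam_threshold (int): The threshold above which an email is considered spam, and also the max allowed spam emails.
--
--     Returns:
--         int: The length of the largest window with more than spam_threshold spam emails.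
--     """
--     left = 0  # Initialize the left pointer.
--     current_spam_count = 0  # Initialize the count of spam emails in the current window.
--     max_spam_window = 0  # Initialize the maximum spam window length.
--     for right in range(len(email_scores)):  # Iterate through the email scores.
--         if email_scores[right] >= spam_threshold:  # If the current email is spam:
--             current_spam_count += 1  # Increment the spam count.
--         # Shrink the window from the left to maintain the spam threshold.
--         while current_spam_count > spam_threshold:
--             if email_scores[left] >= spam_threshold:  # If the email leaving the window is spam:
--                 current_spam_count -= 1  # Decrement the spam count.
--             left += 1  # Move the left pointer.
--         max_spam_window = max(max_spam_window, right - left + 1)  # Update the maximum spam window length.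
--     return max_spam_window
-- ===== SOURCE B (Python) =====
-- def spam_detection(email_scores, spam_threshold):
--     # Prefix-count + binary search per right end (A uses an amortized two-pointer sliding window).
--     prefix = [0]
--     for score in email_scores:
--         prefix.append(prefix[-1] + (1 if score >= spam_threshold else 0))
--     best = 0
--     for right in range(len(email_scores)):
--         target = prefix[right + 1] - spam_threshold
--         lo, hi = 0, right + 1
--         while lo < hi:
--             mid = (lo + hi) // 2
--             if prefix[mid] < target:
--                 lo = mid + 1
--             else:
--                 hi = mid
--         best = max(best, right + 1 - lo)
--     return best
-- ===== Notes on version B (the rewrite author's own statement) =====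
-- stated objective: alternative
-- what changed: Replaced A's amortized two-pointer sliding window by a prefix spam-count array plus a hand-written bisect_left binary search over the monotone prefix for each right end.
-- crash fix: On spam_threshold < 0 with a nonempty list A's shrink loop walks left past the end and raises IndexError; B returns 0 (no window has at most spam_threshold spam emails). — e.g. on spam_detection([0], -1): A raises IndexError, B returns 0
import Mathlib
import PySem

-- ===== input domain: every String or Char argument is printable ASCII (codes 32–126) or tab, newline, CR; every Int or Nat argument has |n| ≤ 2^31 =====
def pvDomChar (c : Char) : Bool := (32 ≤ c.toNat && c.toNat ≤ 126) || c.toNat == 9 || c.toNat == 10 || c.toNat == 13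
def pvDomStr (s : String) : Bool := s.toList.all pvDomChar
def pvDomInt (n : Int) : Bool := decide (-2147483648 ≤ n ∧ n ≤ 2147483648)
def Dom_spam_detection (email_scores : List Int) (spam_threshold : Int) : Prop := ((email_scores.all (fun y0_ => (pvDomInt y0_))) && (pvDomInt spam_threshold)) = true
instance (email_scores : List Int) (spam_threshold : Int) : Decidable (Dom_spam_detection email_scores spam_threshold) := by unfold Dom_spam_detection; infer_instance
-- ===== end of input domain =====

-- B replaces A's amortized two-pointer sliding window by a prefix-count array with a
-- hand-written binary search (bisect_left) per right end; same return value on Pre_.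

-- ===== PORT A =====
-- A's inner `while current_spam_count > spam_threshold` loop; the fuel argument only bounds
-- the number of iterations (es.length + 1 always suffices under Pre_); on an out-of-range
-- index Python raises IndexError (excluded by Pre_).
def spamShrink (es : List Int) (t : Int) : Nat → Int × Int → Int × Int
  | 0, s => s
  | fuel+1, (left, count) =>
    if count > t then
      match PySem.List.pyGet? es left with
      | some x => spamShrink es t fuel (left + 1, if x ≥ t then count - 1 else count)
      | none => (left, count)   -- IndexError in Python; unreachable under Pre_
    else (left, count)

-- one iteration of A's `for right in range(len(email_scores))` body; state = (left, count, max)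
def spamStepA (es : List Int) (t : Int) (s : Int × Int × Int) (right : Nat) : Int × Int × Int :=
  let count := if (PySem.List.pyGet? es (right : Int)).getD 0 ≥ t then s.2.1 + 1 else s.2.1
  let p := spamShrink es t (es.length + 1) (s.1, count)
  (p.1, p.2, max s.2.2 ((right : Int) - p.1 + 1))

def spam_detection (email_scores : List Int) (spam_threshold : Int) : Int :=
  ((List.range email_scores.length).foldl (spamStepA email_scores spam_threshold) (0, 0, 0)).2.2

-- ===== PORT B =====
-- B's hand-written bisect_left `while lo < hi` loop; fuel only bounds the iterations
-- (hi - lo always suffices).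
def bsearchLo (pre : List Int) (target : Int) : Nat → Int → Int → Int
  | 0, lo, _ => lo
  | fuel+1, lo, hi =>
    if lo < hi then
      let mid := PySem.Int.floordiv (lo + hi) 2
      if (PySem.List.pyGet? pre mid).getD 0 < target then bsearchLo pre target fuel (mid + 1) hi
      else bsearchLo pre target fuel lo mid
    else lo

-- one iteration of B's `for right in range(len(email_scores))` body
def spamStepB (pre : List Int) (t : Int) (best : Int) (right : Nat) : Int :=
  let target := (PySem.List.pyGet? pre ((right : Int) + 1)).getD 0 - t
  let lo := bsearchLo pre target (right + 1) 0 ((right : Int) + 1)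
  max best ((right : Int) + 1 - lo)

def spam_detection_alt (email_scores : List Int) (spam_threshold : Int) : Int :=
  let pre := email_scores.foldl
    (fun p score => p ++ [(PySem.List.pyGet? p (-1)).getD 0 + (if score ≥ spam_threshold then 1 else 0)])
    [0]
  (List.range email_scores.length).foldl (spamStepB pre spam_threshold) 0

-- ===== PRECONDITION & SPEC =====
-- A raises IndexError whenever spam_threshold < 0 and the list is nonempty (the shrink loop
-- runs left past the end); on every other input A returns normally.
def Pre_spam_detection (email_scores : List Int) (spam_threshold : Int) : Prop :=
  0 ≤ spam_threshold ∨ email_scores = []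
instance (email_scores : List Int) (spam_threshold : Int) : Decidable (Pre_spam_detection email_scores spam_threshold) := by unfold Pre_spam_detection; infer_instance
def pvWitness_spam_detection : List Int × Int := ([3, 1, 4, 1, 5], 2)

-- On spam_threshold < 0 with a nonempty list A raises IndexError, while B returns 0 (no window has at most spam_threshold spam emails).
def Raises_spam_detection (email_scores : List Int) (spam_threshold : Int) : Prop :=
  spam_threshold < 0 ∧ email_scores ≠ []
instance (email_scores : List Int) (spam_threshold : Int) : Decidable (Raises_spam_detection email_scores spam_threshold) := by unfold Raises_spam_detection; infer_instance
def pvRaiseWitness_spam_detection : List Int × Int := ([0], -1)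
def pvRaiseWitnessOut_spam_detection : Int := 0

def Spec_spam_detection (email_scores : List Int) (spam_threshold : Int) (out : Int) : Prop := out = spam_detection_alt email_scores spam_threshold
instance (email_scores : List Int) (spam_threshold : Int) (out : Int) : Decidable (Spec_spam_detection email_scores spam_threshold out) := by unfold Spec_spam_detection; infer_instance

-- ===== CLAIM (what is proved, stated in full; the proofs are below) =====
def Claim_equal_spam_detection : Prop := ∀ (email_scores : List Int) (spam_threshold : Int), Dom_spam_detection email_scores spam_threshold → Pre_spam_detection email_scores spam_threshold → Spec_spam_detection email_scores spam_threshold (spam_detection email_scores spam_threshold)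
def Claim_raises_spam_detection : Prop := (∀ (email_scores : List Int) (spam_threshold : Int), Dom_spam_detection email_scores spam_threshold → Raises_spam_detection email_scores spam_threshold → ¬ Pre_spam_detection email_scores spam_threshold) ∧ (Dom_spam_detection (pvRaiseWitness_spam_detection.1) (pvRaiseWitness_spam_detection.2) ∧ Raises_spam_detection (pvRaiseWitness_spam_detection.1) (pvRaiseWitness_spam_detection.2) ∧ spam_detection_alt (pvRaiseWitness_spam_detection.1) (pvRaiseWitness_spam_detection.2) = pvRaiseWitnessOut_spam_detection)

-- ===== LEMMAS AND PROOFS =====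

-- Pcnt es t k = number of spam scores among the first k elements
def Pcnt (es : List Int) (t : Int) (k : Nat) : Int :=
  ((es.take k).countP (fun x => decide (x ≥ t)) : Int)

def feas (es : List Int) (t : Int) (r l : Nat) : Prop := Pcnt es t r - Pcnt es t l ≤ t

-- l is the least feasible left end for the window ending (exclusively) at r
def MinFeas (es : List Int) (t : Int) (r l : Nat) : Prop :=
  l ≤ r ∧ feas es t r l ∧ ∀ l' < l, ¬ feas es t r l'

lemma Pcnt_zero (es : List Int) (t : Int) : Pcnt es t 0 = 0 := rfl

lemma Pcnt_succ (es : List Int) (t : Int) (k : Nat) (h : k < es.length) :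
    Pcnt es t (k+1) = Pcnt es t k + (if es[k] ≥ t then 1 else 0) := by
  unfold Pcnt
  rw [List.take_add_one, List.getElem?_eq_getElem h]
  rw [Option.toList_some, List.countP_append]
  by_cases hx : es[k] ≥ t <;> simp [hx]

lemma Pcnt_mono (es : List Int) (t : Int) {k m : Nat} (h : k ≤ m) :
    Pcnt es t k ≤ Pcnt es t m := by
  unfold Pcnt
  have : (es.take m).take k = es.take k := by rw [List.take_take, min_eq_left h]
  rw [← this]
  exact_mod_cast List.Sublist.countP_le (List.take_sublist _ _)

lemma feas_mono_l (es : List Int) (t : Int) {r l l' : Nat} (h : l ≤ l')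
    (hf : feas es t r l) : feas es t r l' := by
  have := Pcnt_mono es t h
  unfold feas at *; omega

lemma not_feas_succ_r (es : List Int) (t : Int) {r l : Nat} (hf : ¬ feas es t r l) :
    ¬ feas es t (r+1) l := by
  have := Pcnt_mono es t (show r ≤ r + 1 by omega)
  unfold feas at *; omega

lemma minFeas_unique (es : List Int) (t : Int) {r a b : Nat}
    (ha : MinFeas es t r a) (hb : MinFeas es t r b) : a = b := by
  rcases ha with ⟨_, hfa, hba⟩
  rcases hb with ⟨_, hfb, hbb⟩
  rcases Nat.lt_trichotomy a b with h | h | h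
  · exact absurd hfa (hbb a h)
  · exact h
  · exact absurd hfb (hba b h)

-- A's shrink loop reaches the least feasible left end and the matching count
lemma spamShrink_eq (es : List Int) (t : Int) (ht : 0 ≤ t) (r : Nat) (hr : r ≤ es.length) :
    ∀ (fuel l : Nat), l ≤ r → r - l ≤ fuel → (∀ l' < l, ¬ feas es t r l') →
    ∃ L, MinFeas es t r L ∧
      spamShrink es t fuel ((l : Int), Pcnt es t r - Pcnt es t l)
        = ((L : Int), Pcnt es t r - Pcnt es t L) := by
  intro fuel
  induction fuel with
  | zero =>
    intro l hlr hfuel hbelow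
    have hlr' : l = r := by omega
    subst hlr'
    exact ⟨l, ⟨le_refl _, by unfold feas; omega, hbelow⟩, rfl⟩
  | succ fuel ih =>
    intro l hlr hfuel hbelow
    by_cases hc : Pcnt es t r - Pcnt es t l > t
    · -- loop body runs
      have hPl : Pcnt es t l < Pcnt es t r := by omega
      have hlt : l < r := by
        rcases Nat.lt_or_ge l r with h | h
        · exact h
        · have : l = r := by omega
          subst this; omega
      have hln : l < es.length := lt_of_lt_of_le hlt hr
      have hget : PySem.List.pyGet? es ((l : Int)) = some es[l] := by
        simp [PySem.List.pyGet?_natCast, List.getElem?_eq_getElem hln]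
      have hstep : (if es[l] ≥ t then (Pcnt es t r - Pcnt es t l) - 1 else Pcnt es t r - Pcnt es t l)
          = Pcnt es t r - Pcnt es t (l+1) := by
        have hPs := Pcnt_succ es t l hln
        by_cases h : es[l] ≥ t
        · rw [if_pos h] at hPs ⊢; omega
        · rw [if_neg h] at hPs ⊢; omega
      have hbelow' : ∀ l' < l + 1, ¬ feas es t r l' := by
        intro l' hl'
        rcases Nat.lt_or_ge l' l with h | h
        · exact hbelow l' h
        · have : l' = l := by omega
          subst this
          unfold feas; omega
      obtain ⟨L, hL, heq⟩ := ih (l+1) (by omega) (by omega) hbelow'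
      refine ⟨L, hL, ?_⟩
      rw [spamShrink]
      simp only [if_pos hc, hget, hstep]
      rw [show ((l : Int) + 1) = ((l + 1 : Nat) : Int) by push_cast; ring]
      exact heq
    · -- loop stops: l is feasible
      refine ⟨l, ⟨hlr, by unfold feas; omega, hbelow⟩, ?_⟩
      rw [spamShrink]
      simp [hc]

-- the prefix list B builds is exactly [Pcnt 0, Pcnt 1, …, Pcnt n]
lemma prefix_eq (es : List Int) (t : Int) :
    es.foldl (fun p score => p ++ [(PySem.List.pyGet? p (-1)).getD 0 + (if score ≥ t then 1 else 0)]) [0]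
      = (List.range (es.length + 1)).map (Pcnt es t) := by
  induction es using List.reverseRecOn with
  | nil => simp [Pcnt]
  | append_singleton es' x ih =>
    rw [List.foldl_append, ih]
    have hne : (List.range (es'.length + 1)).map (Pcnt es' t) ≠ [] := by simp
    have hlast : PySem.List.pyGet? ((List.range (es'.length + 1)).map (Pcnt es' t)) (-1)
        = some (Pcnt es' t es'.length) := by
      rw [PySem.List.pyGet?_neg_one]
      rw [List.range_succ, List.map_append]
      simp
    have hsame : ∀ k ≤ es'.length, Pcnt (es' ++ [x]) t k = Pcnt es' t k := by
      intro k hk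
      unfold Pcnt
      rw [List.take_append_of_le_length hk]
    have hlen : (es' ++ [x]).length = es'.length + 1 := by simp
    rw [hlen]
    rw [List.range_succ (n := es'.length + 1), List.map_append]
    have hmap : (List.range (es'.length + 1)).map (Pcnt (es' ++ [x]) t)
        = (List.range (es'.length + 1)).map (Pcnt es' t) := by
      apply List.map_congr_left
      intro k hk
      exact hsame k (by simpa using Nat.lt_succ_iff.mp (List.mem_range.mp hk))
    have htop : Pcnt (es' ++ [x]) t (es'.length + 1)
        = Pcnt es' t es'.length + (if x ≥ t then 1 else 0) := by
      unfold Pcnt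
      rw [show (es' ++ [x]).take (es'.length + 1) = es' ++ [x] by
            apply List.take_of_length_le; simp,
          List.take_length, List.countP_append]
      by_cases h : x ≥ t <;> simp [h]
    simp only [List.foldl_cons, List.foldl_nil, hlast, hmap, Option.getD_some,
      List.map_cons, List.map_nil]
    rw [htop]

-- B's binary search reaches the least feasible left end
lemma bsearch_eq (es : List Int) (t : Int) (r : Nat) (hr : r ≤ es.length) :
    ∀ (fuel lo hi : Nat), lo ≤ hi → hi ≤ r → hi - lo ≤ fuel →
    (∀ i < lo, ¬ feas es t r i) → feas es t r hi →
    ∃ L, MinFeas es t r L ∧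
      bsearchLo ((List.range (es.length + 1)).map (Pcnt es t)) (Pcnt es t r - t) fuel (lo : Int) (hi : Int)
        = (L : Int) := by
  intro fuel
  induction fuel with
  | zero =>
    intro lo hi hlohi hhir hfuel hbelow hfhi
    have : lo = hi := by omega
    subst this
    exact ⟨lo, ⟨le_trans hlohi hhir, hfhi, hbelow⟩, rfl⟩
  | succ fuel ih =>
    intro lo hi hlohi hhir hfuel hbelow hfhi
    by_cases hlt : lo < hi
    · set m : Nat := (lo + hi) / 2 with hm
      have hmid : PySem.Int.floordiv ((lo : Int) + (hi : Int)) 2 = (m : Int) := by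
        rw [show ((lo : Int) + (hi : Int)) = ((lo + hi : Nat) : Int) by push_cast; ring]
        exact_mod_cast PySem.Int.floordiv_natCast (lo + hi) 2
      have hmlo : lo ≤ m := by omega
      have hmhi : m < hi := by omega
      have hmn : m < es.length + 1 := by omega
      have hget : PySem.List.pyGet? ((List.range (es.length + 1)).map (Pcnt es t)) ((m : Int))
          = some (Pcnt es t m) := by
        simp [PySem.List.pyGet?_natCast, hmn]
      rw [bsearchLo]
      rw [if_pos (show ((lo : Int)) < ((hi : Int)) by exact_mod_cast hlt)]
      simp only [hmid, hget, Option.getD_some]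
      by_cases hcmp : Pcnt es t m < Pcnt es t r - t
      · -- prefix[mid] < target: m infeasible, go right
        have hbelow' : ∀ i < m + 1, ¬ feas es t r i := by
          intro i hi'
          rcases Nat.lt_or_ge i lo with h | h
          · exact hbelow i h
          · intro hfi
            have : feas es t r m := feas_mono_l es t (by omega) hfi
            unfold feas at this; omega
        obtain ⟨L, hL, heq⟩ := ih (m+1) hi (by omega) hhir (by omega) hbelow' hfhi
        refine ⟨L, hL, ?_⟩
        rw [if_pos hcmp]
        rw [show ((m : Int) + 1) = ((m + 1 : Nat) : Int) by push_cast; ring]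
        exact heq
      · -- m feasible, go left
        have hfm : feas es t r m := by unfold feas; omega
        obtain ⟨L, hL, heq⟩ := ih lo m hmlo (by omega) (by omega) hbelow hfm
        refine ⟨L, hL, ?_⟩
        rw [if_neg hcmp]
        exact heq
    · have : lo = hi := by omega
      subst this
      rw [bsearchLo]
      rw [if_neg (show ¬ ((lo : Int)) < ((lo : Int)) by omega)]
      exact ⟨lo, ⟨le_trans hlohi hhir, hfhi, hbelow⟩, rfl⟩

-- the combined loop invariant: after k iterations A's state is (least left, its count, m)
-- and B's accumulator is the same m
lemma main_invariant (es : List Int) (t : Int) (ht : 0 ≤ t) :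
    ∀ k, k ≤ es.length →
    ∃ (L : Nat) (m : Int), MinFeas es t k L ∧
      (List.range k).foldl (spamStepA es t) (0, 0, 0) = ((L : Int), Pcnt es t k - Pcnt es t L, m) ∧
      (List.range k).foldl (spamStepB ((List.range (es.length + 1)).map (Pcnt es t)) t) 0 = m := by
  intro k
  induction k with
  | zero =>
    intro _
    exact ⟨0, 0, ⟨le_refl _, by unfold feas; simp [Pcnt_zero]; omega, by omega⟩, by simp [Pcnt_zero], rfl⟩
  | succ k ih =>
    intro hk
    obtain ⟨L, m, hMF, hA, hB⟩ := ih (by omega)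
    have hkn : k < es.length := by omega
    rw [List.range_succ (n := k), List.foldl_append, List.foldl_cons, List.foldl_nil, hA,
       List.foldl_append, List.foldl_cons, List.foldl_nil, hB]
    -- A's step
    have hget : PySem.List.pyGet? es ((k : Int)) = some es[k] := by
      simp [PySem.List.pyGet?_natCast, List.getElem?_eq_getElem hkn]
    have hcount : (if es[k] ≥ t then (Pcnt es t k - Pcnt es t L) + 1 else Pcnt es t k - Pcnt es t L)
        = Pcnt es t (k+1) - Pcnt es t L := by
      have hPs := Pcnt_succ es t k hkn
      by_cases h : es[k] ≥ t
      · rw [if_pos h] at hPs ⊢; omega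
      · rw [if_neg h] at hPs ⊢; omega
    have hbelow' : ∀ l' < L, ¬ feas es t (k+1) l' :=
      fun l' hl' => not_feas_succ_r es t (hMF.2.2 l' hl')
    obtain ⟨L', hMF', hshrink⟩ :=
      spamShrink_eq es t ht (k+1) (by omega) (es.length + 1) L (by have := hMF.1; omega) (by have := hMF.1; omega) hbelow'
    -- B's step
    have hgetp : PySem.List.pyGet? ((List.range (es.length + 1)).map (Pcnt es t)) ((k : Int) + 1)
        = some (Pcnt es t (k+1)) := by
      rw [show ((k : Int) + 1) = ((k + 1 : Nat) : Int) by push_cast; ring]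
      rw [PySem.List.pyGet?_natCast]
      simp [Nat.succ_lt_succ hkn]
    obtain ⟨L'', hMF'', hbs⟩ :=
      bsearch_eq es t (k+1) (by omega) (k+1) 0 (k+1) (by omega) (le_refl _) (by omega)
        (fun i h => absurd h (by omega)) (by unfold feas; omega)
    have hLL : L'' = L' := minFeas_unique es t hMF'' hMF'
    refine ⟨L', max m ((k : Int) - L' + 1), hMF', ?_, ?_⟩
    · simp only [spamStepA, hget, Option.getD_some, hcount, hshrink]
    · simp only [spamStepB, hgetp, Option.getD_some]
      rw [show ((k : Int) + 1) = ((k + 1 : Nat) : Int) by push_cast; ring,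
          show ((0 : Int)) = ((0 : Nat) : Int) by simp]
      rw [hbs, hLL]
      congr 1
      push_cast
      ring

-- ===== VERDICT (by name: the statement is the Claim_ definition above) =====
theorem spam_detection_spec : Claim_equal_spam_detection := by
  intro es t _ hpre
  unfold Spec_spam_detection
  rcases hpre with ht | hnil
  · obtain ⟨L, m, _, hA, hB⟩ := main_invariant es t ht es.length (le_refl _)
    unfold spam_detection spam_detection_alt
    rw [prefix_eq, hA, hB]
  · subst hnil
    rfl

@[simp]
theorem spam_detection_raises : Claim_raises_spam_detection := by
  unfold Claim_raises_spam_detection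
  constructor
  · intro es t _ hraises hpre
    rcases hpre with h | h
    · have := hraises.1; omega
    · exact hraises.2 h
  · exact ⟨by decide, ⟨by decide, by decide⟩, by decide⟩
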